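-- pv_equiv track=rewrite | github.com/macHimself/astanalyzer | astanalyzer/filtering/ignore_rules.py | _is_disabled_by_block
-- ===== SOURCE A (Python) =====
-- IGNORE_PREFIX = "astanalyzer:"
--
-- def _parse_toggle_command(text: str) -> tuple[str | None, set[str]]:
--     """Parse block enable/disable directives.
--
--     Returns:
--         ("disable", {"COND-002"})
--         ("enable", {"COND-002"})
--         ("disable", {"*"})
--         ("enable", {"*"})
--         (None, set())
--     """
--     if not text:
--         return None, set()
--
--     text = text.strip()
--     if IGNORE_PREFIX not in text:
--         return None, set()
--
--     try:
--         _, rest = text.split(IGNORE_PREFIX, 1)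
--     except ValueError:
--         return None, set()
--
--     rest = rest.strip()
--
--     if rest.startswith("disable"):
--         cmd = "disable"
--         rest = rest[len("disable") :].strip()
--     elif rest.startswith("enable"):
--         cmd = "enable"
--         rest = rest[len("enable") :].strip()
--     else:
--         return None, set()
--
--     if not rest:
--         return cmd, {"*"}
--
--     parts = [p.strip() for p in rest.split(",")]
--     return cmd, {p for p in parts if p}
--
-- def _is_disabled_by_block(rule_id: str, lines: list[str], lineno: int) -> bool:
--     """Check whether a rule is disabled by earlier block directives."""
--     disabled_all = False
--     disabled_rules: set[str] = set()
--
--     for i in range(min(lineno - 1, len(lines))):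
--         line = lines[i].strip()
--         cmd, ids = _parse_toggle_command(line)
--
--         if cmd is None:
--             continue
--
--         if cmd == "disable":
--             if "*" in ids:
--                 disabled_all = True
--             else:
--                 disabled_rules.update(ids)
--
--         elif cmd == "enable":
--             if "*" in ids:
--                 disabled_all = False
--                 disabled_rules.clear()
--             else:
--                 disabled_rules.difference_update(ids)
--
--     return disabled_all or rule_id in disabled_rules
-- ===== SOURCE B (Python) =====
-- IGNORE_PREFIX = "astanalyzer:"
--
-- def _parse_toggle_command(text):
--     if not text:
--         return None, set()
--     text = text.strip()
--     if IGNORE_PREFIX not in text: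
--         return None, set()
--     try:
--         _, rest = text.split(IGNORE_PREFIX, 1)
--     except ValueError:
--         return None, set()
--     rest = rest.strip()
--     if rest.startswith("disable"):
--         cmd = "disable"
--         rest = rest[len("disable"):].strip()
--     elif rest.startswith("enable"):
--         cmd = "enable"
--         rest = rest[len("enable"):].strip()
--     else:
--         return None, set()
--     if not rest:
--         return cmd, {"*"}
--     parts = [p.strip() for p in rest.split(",")]
--     return cmd, {p for p in parts if p}
--
-- def _is_disabled_by_block(rule_id, lines, lineno):
--     """Reverse scan: the nearest relevant directive decides; stop once both flags are resolved."""
--     all_state = None   # resolved value of the global disable flag, None = not yet decided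
--     rule_state = None  # resolved membership of rule_id in the disabled set
--     for i in range(min(lineno - 1, len(lines)) - 1, -1, -1):
--         cmd, ids = _parse_toggle_command(lines[i].strip())
--         if cmd is None:
--             continue
--         if "*" in ids:
--             if all_state is None:
--                 all_state = (cmd == "disable")
--             if cmd == "enable" and rule_state is None:
--                 rule_state = False
--         elif rule_id in ids and rule_state is None:
--             rule_state = (cmd == "disable")
--         if all_state is not None and rule_state is not None:
--             break
--     return bool(all_state) or bool(rule_state)
-- ===== Notes on version B (the rewrite author's own statement) =====
-- stated objective: alternative
-- what changed: A accumulates a global flag and a mutable disabled-rules set forward over every line before lineno; B scans the same range in reverse, resolves the global flag from the nearest '*' directive and the rule's own state from the nearest directive touching it, and stops early once both are resolved.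
import Mathlib
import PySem

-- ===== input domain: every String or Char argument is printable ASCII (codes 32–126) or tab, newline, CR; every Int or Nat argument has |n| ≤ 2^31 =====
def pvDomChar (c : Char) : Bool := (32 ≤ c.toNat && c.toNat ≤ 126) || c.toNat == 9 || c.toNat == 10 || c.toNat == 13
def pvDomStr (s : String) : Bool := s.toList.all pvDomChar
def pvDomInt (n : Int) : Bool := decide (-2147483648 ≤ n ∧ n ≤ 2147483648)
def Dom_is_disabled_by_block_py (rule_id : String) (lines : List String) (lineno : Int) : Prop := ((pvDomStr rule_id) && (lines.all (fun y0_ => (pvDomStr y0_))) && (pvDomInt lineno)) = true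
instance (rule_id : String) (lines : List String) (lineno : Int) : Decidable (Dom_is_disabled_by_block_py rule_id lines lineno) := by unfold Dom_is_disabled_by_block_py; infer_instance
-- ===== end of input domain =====

-- B replaces A's forward accumulation (global flag + mutable disabled set over every earlier line) by a
-- reverse scan that resolves the global flag and the rule's own state from the nearest directive and
-- stops early once both are known (objective: alternative decomposition; same asymptotic cost).

-- ===== PORT A =====
-- shared helper: Python's _parse_toggle_command, used by both A and B (as in the module)
def parse_rest (cmd : String) (rest : String) : Option String × PySem.Set String :=
  if rest.toList = [] then (some cmd, PySem.Set.ofList ["*"])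
  else
    -- sep "," is nonempty, so split? is always some; getD [] is unreachable
    let parts := ((PySem.Str.split? rest ",").getD []).map PySem.Str.strip
    (some cmd, PySem.Set.ofList (parts.filter (fun p => p.toList ≠ [])))

-- rest.startswith("disable")/("enable") dispatch, after the prefix has been split off
def parse_cmd_rest (rest : String) : Option String × PySem.Set String :=
  if PySem.Str.startswith rest "disable" then
    parse_rest "disable" (PySem.Str.strip (PySem.Str.slice rest (some 7) none))
  else if PySem.Str.startswith rest "enable" then
    parse_rest "enable" (PySem.Str.strip (PySem.Str.slice rest (some 6) none))
  else (none, PySem.Set.empty)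

def parse_toggle_command (text : String) : Option String × PySem.Set String :=
  if text.toList = [] then (none, PySem.Set.empty)
  else if PySem.Str.isIn "astanalyzer:" (PySem.Str.strip text) = false then (none, PySem.Set.empty)
  else
    match PySem.Str.splitMax? (PySem.Str.strip text) "astanalyzer:" 1 with
    | some [_, rest] => parse_cmd_rest (PySem.Str.strip rest)
    | _ => (none, PySem.Set.empty)   -- 'except ValueError' fallback

-- one iteration of A's forward loop body
def stepA (st : Bool × PySem.Set String) (line : String) : Bool × PySem.Set String :=
  match parse_toggle_command (PySem.Str.strip line) with
  | (none, _) => st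
  | (some c, p2) =>
    if c = "disable" then
      if PySem.Set.contains p2 "*" then (true, st.2)
      else (st.1, PySem.Set.update st.2 p2)
    else if c = "enable" then
      if PySem.Set.contains p2 "*" then (false, PySem.Set.empty)
      else (st.1, PySem.Set.diff st.2 p2)
    else st

def is_disabled_by_block_py (rule_id : String) (lines : List String) (lineno : Int) : Bool :=
  let st := (PySem.List.pyRange 0 (min (lineno - 1) (PySem.List.len lines)) 1).foldl
      (fun st i => stepA st (PySem.List.pyGetD lines i "")) (false, PySem.Set.empty)
  st.1 || PySem.Set.contains st.2 rule_id

-- ===== PORT B =====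
-- one iteration of B's reverse loop body: update the two resolved flags
def stepB (rule_id : String) (line : String) (a r : Option Bool) : Option Bool × Option Bool :=
  match parse_toggle_command (PySem.Str.strip line) with
  | (none, _) => (a, r)
  | (some c, p2) =>
    if PySem.Set.contains p2 "*" then
      (if a = none then some (decide (c = "disable")) else a,
       if c = "enable" ∧ r = none then some false else r)
    else if PySem.Set.contains p2 rule_id ∧ r = none then
      (a, some (decide (c = "disable")))
    else (a, r)

-- reverse loop over indices n-1, n-2, …, 0 with early exit once both flags are resolved
def loopB (rule_id : String) (lines : List String) : Nat → Option Bool → Option Bool → Bool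
  | 0, a, r => a.getD false || r.getD false
  | n+1, a, r =>
    let p := stepB rule_id (PySem.List.pyGetD lines (n : Int) "") a r
    if p.1.isSome ∧ p.2.isSome then p.1.getD false || p.2.getD false
    else loopB rule_id lines n p.1 p.2

def is_disabled_by_block_py_alt (rule_id : String) (lines : List String) (lineno : Int) : Bool :=
  loopB rule_id lines (min (lineno - 1) (PySem.List.len lines)).toNat none none

-- ===== PRECONDITION & SPEC =====
def Spec_is_disabled_by_block_py (rule_id : String) (lines : List String) (lineno : Int) (out : Bool) : Prop := out = is_disabled_by_block_py_alt rule_id lines lineno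
instance (rule_id : String) (lines : List String) (lineno : Int) (out : Bool) : Decidable (Spec_is_disabled_by_block_py rule_id lines lineno out) := by unfold Spec_is_disabled_by_block_py; infer_instance

-- ===== CLAIM (what is proved, stated in full; the proofs are below) =====
def Claim_equal_is_disabled_by_block_py : Prop := ∀ (rule_id : String) (lines : List String) (lineno : Int), Dom_is_disabled_by_block_py rule_id lines lineno → Spec_is_disabled_by_block_py rule_id lines lineno (is_disabled_by_block_py rule_id lines lineno)

-- ===== LEMMAS AND PROOFS =====

-- the effect of one line on the global flag (some b = the line sets it to b, none = no effect)
def globEff (line : String) : Option Bool :=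
  match parse_toggle_command (PySem.Str.strip line) with
  | (none, _) => none
  | (some c, p2) =>
    if PySem.Set.contains p2 "*" then
      if c = "disable" then some true else if c = "enable" then some false else none
    else none

-- the effect of one line on "rule_id is in the disabled set"
def ruleEff (rid : String) (line : String) : Option Bool :=
  match parse_toggle_command (PySem.Str.strip line) with
  | (none, _) => none
  | (some c, p2) =>
    if PySem.Set.contains p2 "*" then (if c = "enable" then some false else none)
    else if PySem.Set.contains p2 rid then
      (if c = "disable" then some true else if c = "enable" then some false else none)
    else none

-- last effect in the list wins
def lastEff (f : String → Option Bool) (l : List String) : Option Bool :=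
  l.foldl (fun acc x => (f x).or acc) none

lemma parse_rest_fst (c r : String) : (parse_rest c r).1 = some c := by
  unfold parse_rest; split <;> rfl

lemma parse_cmd_rest_cases (r : String) :
    (parse_cmd_rest r).1 = none ∨ (parse_cmd_rest r).1 = some "disable" ∨
      (parse_cmd_rest r).1 = some "enable" := by
  unfold parse_cmd_rest
  split
  · exact Or.inr (Or.inl (parse_rest_fst _ _))
  · split
    · exact Or.inr (Or.inr (parse_rest_fst _ _))
    · exact Or.inl rfl

lemma parse_cmd_cases (t : String) :
    (parse_toggle_command t).1 = none ∨ (parse_toggle_command t).1 = some "disable" ∨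
      (parse_toggle_command t).1 = some "enable" := by
  unfold parse_toggle_command
  split
  · exact Or.inl rfl
  · split
    · exact Or.inl rfl
    · split
      · exact parse_cmd_rest_cases _
      · exact Or.inl rfl

lemma foldl_or (f : String → Option Bool) (l : List String) (i : Option Bool) :
    l.foldl (fun acc x => (f x).or acc) i = (lastEff f l).or i := by
  induction l generalizing i with
  | nil => simp [lastEff]
  | cons x l ih =>
    show l.foldl _ ((f x).or i) = _
    rw [ih]
    have h : lastEff f (x :: l) = (lastEff f l).or (f x) := by
      show l.foldl _ ((f x).or none) = _
      rw [ih]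
      cases f x <;> rfl
    rw [h]
    cases lastEff f l <;> cases f x <;> rfl

lemma lastEff_cons (f : String → Option Bool) (x : String) (l : List String) :
    lastEff f (x :: l) = (lastEff f l).or (f x) := by
  rw [lastEff, List.foldl_cons, foldl_or]; cases f x <;> rfl

lemma or_getD (p q : Option Bool) (d : Bool) : (p.or q).getD d = p.getD (q.getD d) := by
  cases p <;> rfl

lemma stepA_fst (st : Bool × PySem.Set String) (x : String) :
    (stepA st x).1 = (globEff x).getD st.1 := by
  have hc := parse_cmd_cases (PySem.Str.strip x)
  rcases hp : parse_toggle_command (PySem.Str.strip x) with ⟨c?, ids⟩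
  rw [hp] at hc
  simp only at hc
  rcases hc with h | h | h <;> subst h <;>
      simp only [stepA, globEff, hp]
  · rfl
  · by_cases hstar : "*" ∈ ids <;> simp [hstar]
  · by_cases hstar : "*" ∈ ids <;> simp [hstar]

lemma stepA_contains (rid : String) (st : Bool × PySem.Set String) (x : String) :
    PySem.Set.contains (stepA st x).2 rid = (ruleEff rid x).getD (PySem.Set.contains st.2 rid) := by
  have hc := parse_cmd_cases (PySem.Str.strip x)
  rcases hp : parse_toggle_command (PySem.Str.strip x) with ⟨c?, ids⟩
  rw [hp] at hc
  simp only at hc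
  rcases hc with h | h | h <;> subst h <;> simp only [stepA, ruleEff, hp]
  · rfl
  · -- disable
    by_cases hstar : "*" ∈ ids <;> simp [hstar]
    by_cases hrid : rid ∈ ids <;> simp [hrid]
  · -- enable
    by_cases hstar : "*" ∈ ids <;> simp [hstar]
    by_cases hrid : rid ∈ ids <;> simp [hrid]

lemma foldA_char (rid : String) (l : List String) (a : Bool) (s : PySem.Set String) :
    (l.foldl stepA (a, s)).1 = (lastEff globEff l).getD a ∧
      PySem.Set.contains (l.foldl stepA (a, s)).2 rid
        = (lastEff (ruleEff rid) l).getD (PySem.Set.contains s rid) := by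
  induction l generalizing a s with
  | nil => simp [lastEff]
  | cons x l ih =>
    rw [List.foldl_cons]
    have hx : l.foldl stepA (stepA (a, s) x) = l.foldl stepA ((stepA (a, s) x).1, (stepA (a, s) x).2) := by rfl
    rw [hx]
    rcases ih (stepA (a, s) x).1 (stepA (a, s) x).2 with ⟨h1, h2⟩
    constructor
    · rw [h1, stepA_fst, lastEff_cons, or_getD]
    · rw [h2, stepA_contains, lastEff_cons, or_getD]

lemma stepB_eq (rid x : String) (a r : Option Bool) :
    stepB rid x a r = (a.or (globEff x), r.or (ruleEff rid x)) := by
  have hc := parse_cmd_cases (PySem.Str.strip x)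
  rcases hp : parse_toggle_command (PySem.Str.strip x) with ⟨c?, ids⟩
  rw [hp] at hc
  simp only at hc
  rcases hc with h | h | h <;> subst h <;> simp only [stepB, globEff, ruleEff, hp]
  · cases a <;> cases r <;> rfl
  · -- disable
    by_cases hstar : "*" ∈ ids <;> simp [hstar]
    · cases a <;> cases r <;> simp
    · by_cases hrid : rid ∈ ids <;> simp [hrid] <;> cases a <;> cases r <;> simp
  · -- enable
    by_cases hstar : "*" ∈ ids <;> simp [hstar]
    · cases a <;> cases r <;> simp
    · by_cases hrid : rid ∈ ids <;> simp [hrid] <;> cases a <;> cases r <;> simp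

lemma loopB_char (rid : String) (lines : List String) (n : Nat) (hn : n ≤ lines.length)
    (a r : Option Bool) :
    loopB rid lines n a r
      = ((a.or (lastEff globEff (lines.take n))).getD false
        || (r.or (lastEff (ruleEff rid) (lines.take n))).getD false) := by
  induction n generalizing a r with
  | zero =>
    simp only [loopB, List.take_zero, lastEff, List.foldl_nil, Option.or_none]
  | succ n ih =>
    have hn' : n < lines.length := hn
    have hx : lines.take (n + 1) = lines.take n ++ [lines[n]] := by
      rw [List.take_add_one]; simp [List.getElem?_eq_getElem hn']
    have hget : PySem.List.pyGetD lines (n : Int) "" = lines[n] := by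
      simp [List.getD_eq_getElem?_getD, List.getElem?_eq_getElem hn']
    have hlast : ∀ f : String → Option Bool,
        lastEff f (lines.take (n+1)) = (f lines[n]).or (lastEff f (lines.take n)) := by
      intro f
      rw [hx]
      show (lines.take n ++ [lines[n]]).foldl (fun acc x => (f x).or acc) none = _
      rw [List.foldl_append, List.foldl_cons, List.foldl_nil]
      rfl
    rw [loopB]
    simp only [stepB_eq, hget]
    have ha : ((a.or (globEff lines[n])).or (lastEff globEff (lines.take n)))
        = a.or (lastEff globEff (lines.take (n+1))) := by
      rw [hlast]; cases a <;> cases globEff lines[n] <;> rfl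
    have hr : ((r.or (ruleEff rid lines[n])).or (lastEff (ruleEff rid) (lines.take n)))
        = r.or (lastEff (ruleEff rid) (lines.take (n+1))) := by
      rw [hlast]; cases r <;> cases ruleEff rid lines[n] <;> rfl
    split
    · rename_i hsome
      rcases hsome with ⟨h1, h2⟩
      rw [← ha, ← hr]
      rcases h1' : a.or (globEff lines[n]) with _ | b1
      · rw [h1'] at h1; simp at h1
      · rcases h2' : r.or (ruleEff rid lines[n]) with _ | b2
        · rw [h2'] at h2; simp at h2
        · simp
    · rw [ih (Nat.le_of_lt hn'), ha, hr]

lemma prefix_fold_eq (lines : List String) (lineno : Int) :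
    (PySem.List.pyRange 0 (min (lineno - 1) (PySem.List.len lines)) 1).foldl
        (fun st i => stepA st (PySem.List.pyGetD lines i "")) (false, PySem.Set.empty)
      = (lines.take (min (lineno - 1) (PySem.List.len lines)).toNat).foldl stepA
          (false, PySem.Set.empty) := by
  set m : Int := min (lineno - 1) (PySem.List.len lines) with hm
  have hmle : m ≤ (lines.length : Int) := by
    simp [hm, PySem.List.len_eq]
  by_cases h0 : m ≤ 0
  · rw [PySem.List.pyRange_one_eq_nil h0]
    have : m.toNat = 0 := Int.toNat_of_nonpos h0
    simp [this]
  · have htn : ((m.toNat : Int)) = m := Int.toNat_of_nonneg (by omega)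
    have hlen : (lines.take m.toNat).length = m.toNat := by
      rw [List.length_take]; omega
    have hcongr : (PySem.List.pyRange 0 m 1).foldl
        (fun st i => stepA st (PySem.List.pyGetD lines i "")) (false, PySem.Set.empty)
        = (PySem.List.pyRange 0 m 1).foldl
        (fun st i => stepA st (PySem.List.pyGetD (lines.take m.toNat) i "")) (false, PySem.Set.empty) := by
      apply PySem.List.foldl_congr_mem
      intro acc j hj
      rw [PySem.List.mem_pyRange_one] at hj
      have hj2 : j < (lines.length : Int) := lt_of_lt_of_le hj.2 hmle
      have e1 : PySem.List.pyGetD lines j "" = lines[j.toNat]'(by omega) :=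
        PySem.List.pyGetD_eq_getElem lines "" hj.1 (by exact_mod_cast hj2)
      have e2 : PySem.List.pyGetD (lines.take m.toNat) j "" = (lines.take m.toNat)[j.toNat]'(by rw [hlen]; omega) :=
        PySem.List.pyGetD_eq_getElem _ "" hj.1 (by rw [hlen]; omega)
      rw [e1, e2]
      congr 1
      rw [List.getElem_take]
    rw [hcongr]
    have := PySem.List.foldl_pyRange_zero_pyGetD' (lines.take m.toNat) ""
      stepA (false, PySem.Set.empty)
    rw [hlen] at this
    rw [htn] at this
    exact this

-- ===== VERDICT (by name: the statement is the Claim_ definition above) =====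
theorem is_disabled_by_block_py_spec : Claim_equal_is_disabled_by_block_py := by
  intro rule_id lines lineno _
  unfold Spec_is_disabled_by_block_py is_disabled_by_block_py is_disabled_by_block_py_alt
  rw [prefix_fold_eq]
  set m : Nat := (min (lineno - 1) (PySem.List.len lines)).toNat with hm
  have hmle : m ≤ lines.length := by
    simp [hm, PySem.List.len_eq]
  rcases foldA_char rule_id (lines.take m) false PySem.Set.empty with ⟨h1, h2⟩
  change (((lines.take m).foldl stepA (false, PySem.Set.empty)).1
      || PySem.Set.contains ((lines.take m).foldl stepA (false, PySem.Set.empty)).2 rule_id) = _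
  rw [loopB_char rule_id lines m hmle none none, h1, h2]
  simp [PySem.Set.empty]
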